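-- pv_equiv track=rewrite | github.com/melloweentea/song_recognition | app.py | match_sample
-- ===== SOURCE A (Python) =====
-- def match_sample(sample_hashes, database):
--     match_counts = {}
--     for song, hashes in database.items():
--         hash_set = set(h[0] for h in hashes)
--         match_count = sum(1 for h, _ in sample_hashes if h in hash_set)
--         match_counts[song] = match_count
--
--     if match_counts:
--         best_match = max(match_counts, key=match_counts.get)
--         return best_match, match_counts[best_match]
--     return None, 0
-- ===== SOURCE B (Python) =====
-- def match_sample(sample_hashes, database):
--     # Count each sample hash once, then score every song by summing those
--     # multiplicities over its distinct hashes: O(D + S) instead of O(D + N*S).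
--     counts = {}
--     for h, _ in sample_hashes:
--         counts[h] = counts.get(h, 0) + 1
--     scores = {}
--     for song, hashes in database.items():
--         scores[song] = sum(counts.get(h, 0) for h in {p[0] for p in hashes})
--     best = (None, 0)
--     for song, score in scores.items():
--         if best[0] is None or score > best[1]:
--             best = (song, score)
--     return best
-- ===== Notes on version B (the rewrite author's own statement) =====
-- stated objective: faster
-- what changed: Instead of scanning all sample hashes once per song against a per-song hash set, B builds a multiplicity counter of the sample hashes once and scores each song by summing counter lookups over its distinct hashes, picking the best with a running fold instead of max(key=get).
import Mathlib
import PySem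

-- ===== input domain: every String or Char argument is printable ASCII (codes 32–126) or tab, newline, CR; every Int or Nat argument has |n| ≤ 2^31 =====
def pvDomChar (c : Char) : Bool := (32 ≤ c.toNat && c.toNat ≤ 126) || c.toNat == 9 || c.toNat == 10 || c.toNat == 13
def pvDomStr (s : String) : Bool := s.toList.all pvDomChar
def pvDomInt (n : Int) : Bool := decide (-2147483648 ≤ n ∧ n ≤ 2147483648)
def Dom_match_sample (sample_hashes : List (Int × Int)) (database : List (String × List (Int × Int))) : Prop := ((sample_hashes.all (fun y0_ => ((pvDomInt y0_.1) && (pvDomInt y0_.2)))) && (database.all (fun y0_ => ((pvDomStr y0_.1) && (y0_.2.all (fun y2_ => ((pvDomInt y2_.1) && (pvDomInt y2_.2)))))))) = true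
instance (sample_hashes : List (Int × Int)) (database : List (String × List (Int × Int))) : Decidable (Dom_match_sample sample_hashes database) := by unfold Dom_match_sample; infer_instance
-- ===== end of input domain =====

-- B replaces A's per-song scan of the whole sample (against a per-song hash set) by one
-- sample-hash multiplicity counter, summed over each song's distinct hashes (objective: faster).

-- ===== PORT A =====
def match_sample (sample_hashes : List (Int × Int)) (database : List (String × List (Int × Int))) : Option String × Int :=
  let match_counts : PySem.Dict String Int :=
    database.foldl (fun d p =>
      d.insert p.1
        (sample_hashes.foldl
          (fun acc q => if q.1 ∈ PySem.Set.ofList (p.2.map (fun h => h.1)) then acc + 1 else acc)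
          (0 : Int)))
      PySem.Dict.empty
  -- 'if match_counts: best = max(match_counts, key=match_counts.get)'; max? is none exactly when the dict is empty
  match PySem.List.max? match_counts.keys (fun s => match_counts.getD s 0) with
  | some best_match => (some best_match, match_counts.getD best_match 0)
  | none => (none, 0)

-- ===== PORT B =====
def match_sample_alt (sample_hashes : List (Int × Int)) (database : List (String × List (Int × Int))) : Option String × Int :=
  let counts : PySem.Dict Int Int := PySem.Dict.counter (sample_hashes.map (fun q => q.1))
  let scores : PySem.Dict String Int :=
    database.foldl (fun d p =>
      d.insert p.1
        ((PySem.Set.ofList (p.2.map (fun h => h.1))).foldl (fun acc h => acc + counts.getD h 0) 0))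
      PySem.Dict.empty
  scores.items.foldl (fun best p => if best.1 = none ∨ p.2 > best.2 then (some p.1, p.2) else best)
    ((none : Option String), (0 : Int))

-- ===== PRECONDITION & SPEC =====
def Spec_match_sample (sample_hashes : List (Int × Int)) (database : List (String × List (Int × Int))) (out : Option String × Int) : Prop := out = match_sample_alt sample_hashes database
instance (sample_hashes : List (Int × Int)) (database : List (String × List (Int × Int))) (out : Option String × Int) : Decidable (Spec_match_sample sample_hashes database out) := by unfold Spec_match_sample; infer_instance

-- ===== CLAIM (what is proved, stated in full; the proofs are below) =====
def Claim_equal_match_sample : Prop := ∀ (sample_hashes : List (Int × Int)) (database : List (String × List (Int × Int))), Dom_match_sample sample_hashes database → Spec_match_sample sample_hashes database (match_sample sample_hashes database)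

-- ===== LEMMAS AND PROOFS =====

-- sum of an equality indicator over a list not containing y is 0
lemma pv_sum_ind_not_mem (y : Int) (S : List Int) (hy : y ∉ S) :
    (S.map (fun h => if y = h then (1 : Int) else 0)).sum = 0 := by
  induction S with
  | nil => simp
  | cons h t ih =>
    simp only [List.mem_cons, not_or] at hy
    simp [ih hy.2, hy.1]

-- sum of an equality indicator over a Nodup list is a membership indicator
lemma pv_sum_ind (y : Int) (S : List Int) (hS : S.Nodup) :
    (S.map (fun h => if y = h then (1 : Int) else 0)).sum = if y ∈ S then 1 else 0 := by
  induction S with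
  | nil => simp
  | cons h t ih =>
    rcases List.nodup_cons.mp hS with ⟨hh, ht⟩
    by_cases hy : y = h
    · subst hy
      simp [pv_sum_ind_not_mem y t hh]
    · simp [ih ht, hy]

-- Σ_{h ∈ S} count h ys = number of elements of ys lying in S   (S Nodup)
lemma pv_sum_count (S : List Int) (hS : S.Nodup) (ys : List Int) :
    (S.map (fun h => (List.count h ys : Int))).sum
      = ((ys.countP (fun y => decide (y ∈ S)) : Nat) : Int) := by
  induction ys with
  | nil => simp
  | cons y t ih =>
    have hmap : (S.map (fun h => (List.count h (y :: t) : Int)))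
        = S.map (fun h => (List.count h t : Int) + if y = h then (1 : Int) else 0) := by
      apply List.map_congr_left
      intro h _
      rw [List.count_cons]
      push_cast
      simp [beq_iff_eq]
    rw [hmap, PySem.List.sum_map_add_int, ih, pv_sum_ind y S hS, List.countP_cons]
    by_cases hy : y ∈ S <;> simp [hy]

-- A's per-song count (scan the sample against the song's hash set) equals
-- B's per-song score (sum of sample multiplicities over the distinct hashes)
lemma pv_value_eq (sample_hashes : List (Int × Int)) (hashes : List (Int × Int)) :
    sample_hashes.foldl
        (fun acc q => if q.1 ∈ PySem.Set.ofList (hashes.map (fun h => h.1)) then acc + 1 else acc) (0 : Int)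
      = (PySem.Set.ofList (hashes.map (fun h => h.1))).foldl
          (fun acc h => acc + (PySem.Dict.counter (sample_hashes.map (fun q => q.1))).getD h 0) 0 := by
  set S : List Int := PySem.Set.ofList (hashes.map (fun h => h.1)) with hSdef
  have hS : S.Nodup := by
    rw [hSdef]; exact PySem.Set.nodup_ofList _
  have hR : (S.foldl (fun acc h => acc + (PySem.Dict.counter (sample_hashes.map (fun q => q.1))).getD h 0) 0)
      = (S.map (fun h => ((List.count h (sample_hashes.map (fun q => q.1)) : Nat) : Int))).sum := by
    rw [PySem.List.foldl_add]
    simp [PySem.Dict.getD_counter]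
  have hL : ∀ (xs : List (Int × Int)) (a : Int),
      xs.foldl (fun acc q => if q.1 ∈ S then acc + 1 else acc) a
        = a + ((xs.countP (fun q => decide (q.1 ∈ S)) : Nat) : Int) := by
    intro xs
    induction xs with
    | nil => intro a; simp
    | cons q t ih =>
      intro a
      rw [List.foldl_cons, List.countP_cons]
      by_cases hq : q.1 ∈ S
      · simp [hq, ih]
        ring
      · simp [hq, ih]
  rw [hL sample_hashes 0, hR, pv_sum_count S hS]
  rw [List.countP_map]
  simp [Function.comp_def]

-- the two score dictionaries are equal
lemma pv_scores_eq (sample_hashes : List (Int × Int)) (database : List (String × List (Int × Int)))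
    (d : PySem.Dict String Int) :
    database.foldl (fun d p =>
        d.insert p.1 (sample_hashes.foldl
          (fun acc q => if q.1 ∈ PySem.Set.ofList (p.2.map (fun h => h.1)) then acc + 1 else acc) (0 : Int))) d
      = database.foldl (fun d p =>
        d.insert p.1 ((PySem.Set.ofList (p.2.map (fun h => h.1))).foldl
          (fun acc h => acc + (PySem.Dict.counter (sample_hashes.map (fun q => q.1))).getD h 0) 0)) d := by
  induction database generalizing d with
  | nil => rfl
  | cons p t ih =>
    simp only [List.foldl_cons]
    rw [pv_value_eq sample_hashes p.2, ih]

-- B's best-so-far fold over the items computes A's first-maximum selection,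
-- once the running best is a real element (g gives each key its stored value)
lemma pv_sel_some (g : String → Int) (t : List (String × Int)) :
    ∀ (m : String), (∀ p ∈ t, g p.1 = p.2) →
    t.foldl (fun best p => if best.1 = none ∨ p.2 > best.2 then (some p.1, p.2) else best)
        ((some m : Option String), g m)
      = (match t.foldl (fun a p => match a with
            | none => some p.1
            | some mm => if g mm < g p.1 then some p.1 else some mm) (some m) with
          | some b => ((some b : Option String), g b)
          | none => (none, (0 : Int))) := by
  induction t with
  | nil => intro m _; rfl
  | cons p t ih =>
    intro m hg
    have hp : g p.1 = p.2 := hg p (List.mem_cons_self ..)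
    have ht : ∀ q ∈ t, g q.1 = q.2 := fun q hq => hg q (List.mem_cons_of_mem _ hq)
    simp only [List.foldl_cons]
    by_cases hlt : g m < g p.1
    · have h1 : ((if (some m : Option String) = none ∨ p.2 > g m then (some p.1, p.2) else (some m, g m)) : Option String × Int)
          = (some p.1, g p.1) := by
        rw [if_pos (Or.inr (by omega)), hp]
      have h2 : ((if g m < g p.1 then some p.1 else some m) : Option String) = some p.1 := if_pos hlt
      rw [h1, h2]
      exact ih p.1 ht
    · have h1 : ((if (some m : Option String) = none ∨ p.2 > g m then (some p.1, p.2) else (some m, g m)) : Option String × Int)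
          = (some m, g m) := by
        rw [if_neg]
        rintro (h | h)
        · simp at h
        · omega
      have h2 : ((if g m < g p.1 then some p.1 else some m) : Option String) = some m := if_neg hlt
      rw [h1, h2]
      exact ih m ht

-- ===== VERDICT (by name: the statement is the Claim_ definition above) =====
theorem match_sample_spec : Claim_equal_match_sample := by
  intro sample_hashes database _
  unfold Spec_match_sample match_sample match_sample_alt
  show (match PySem.List.max?
          (database.foldl (fun d p =>
            d.insert p.1 (sample_hashes.foldl
              (fun acc q => if q.1 ∈ PySem.Set.ofList (p.2.map (fun h => h.1)) then acc + 1 else acc)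
              (0 : Int))) PySem.Dict.empty).keys
          (fun s => (database.foldl (fun d p =>
            d.insert p.1 (sample_hashes.foldl
              (fun acc q => if q.1 ∈ PySem.Set.ofList (p.2.map (fun h => h.1)) then acc + 1 else acc)
              (0 : Int))) PySem.Dict.empty).getD s 0) with
        | some best_match => (some best_match,
            (database.foldl (fun d p =>
              d.insert p.1 (sample_hashes.foldl
                (fun acc q => if q.1 ∈ PySem.Set.ofList (p.2.map (fun h => h.1)) then acc + 1 else acc)
                (0 : Int))) PySem.Dict.empty).getD best_match 0)
        | none => (none, 0))
      = (database.foldl (fun d p =>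
          d.insert p.1 ((PySem.Set.ofList (p.2.map (fun h => h.1))).foldl
            (fun acc h => acc + (PySem.Dict.counter (sample_hashes.map (fun q => q.1))).getD h 0) 0))
          PySem.Dict.empty).items.foldl
          (fun best p => if best.1 = none ∨ p.2 > best.2 then (some p.1, p.2) else best)
          ((none : Option String), (0 : Int))
  rw [← pv_scores_eq sample_hashes database PySem.Dict.empty]
  set d : PySem.Dict String Int :=
    database.foldl (fun d p =>
      d.insert p.1 (sample_hashes.foldl
        (fun acc q => if q.1 ∈ PySem.Set.ofList (p.2.map (fun h => h.1)) then acc + 1 else acc) (0 : Int)))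
      PySem.Dict.empty with hd
  have hnodup : d.keys.Nodup := by
    rw [hd]
    exact PySem.Dict.nodup_keys_foldl_insert_key database (fun p => p.1) _ PySem.Dict.empty (by simp)
  have hg : ∀ p ∈ d.items, d.getD p.1 0 = p.2 := by
    intro p hp
    exact PySem.Dict.getD_of_mem_items d (by simpa using hp) hnodup 0
  have hkeys : d.keys = d.items.map (fun p => p.1) := rfl
  have hmax : PySem.List.max? d.keys (fun s => d.getD s 0)
      = d.items.foldl (fun a p => match a with
          | none => some p.1
          | some m => if d.getD m 0 < d.getD p.1 0 then some p.1 else some m) none := by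
    rw [PySem.List.max?, hkeys, List.foldl_map]
    congr 1
    funext a p
    cases a <;> rfl
  rw [hmax]
  rcases hitems : d.items with _ | ⟨p, t⟩
  · simp
  · have hp : d.getD p.1 0 = p.2 := hg p (by rw [hitems]; exact List.mem_cons_self ..)
    have ht : ∀ q ∈ t, d.getD q.1 0 = q.2 := fun q hq => hg q (by rw [hitems]; exact List.mem_cons_of_mem _ hq)
    simp only [List.foldl_cons]
    rw [if_pos (Or.inl trivial), ← hp]
    exact (pv_sel_some (fun s => d.getD s 0) t p.1 ht).symm
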